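-- pv_equiv track=rewrite | github.com/Vishwa023/autoapply-system | app/worker/automation.py | _find_matching_card_index
-- ===== SOURCE A (Python) =====
-- def _find_matching_card_index(card_texts: list[str], job_title: str, company: str) -> int:
--     title_l = " ".join((job_title or "").strip().lower().split())
--     company_l = " ".join((company or "").strip().lower().split())
--
--     for idx, text in enumerate(card_texts):
--         normalized = " ".join((text or "").lower().split())
--         if title_l and title_l in normalized and company_l and company_l in normalized:
--             return idx
--
--     for idx, text in enumerate(card_texts):
--         normalized = " ".join((text or "").lower().split())
--         if title_l and title_l in normalized:
--             return idx
--
--     for idx, text in enumerate(card_texts):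
--         normalized = " ".join((text or "").lower().split())
--         if company_l and company_l in normalized:
--             return idx
--
--     return -1
-- ===== SOURCE B (Python) =====
-- def _find_matching_card_index(card_texts: list[str], job_title: str, company: str) -> int:
--     title_l = " ".join((job_title or "").strip().lower().split())
--     company_l = " ".join((company or "").strip().lower().split())
--
--     first_title = None
--     first_company = None
--     for idx, text in enumerate(card_texts):
--         normalized = " ".join((text or "").lower().split())
--         tm = bool(title_l) and title_l in normalized
--         cm = bool(company_l) and company_l in normalized
--         if tm and cm:
--             return idx
--         if tm and first_title is None:
--             first_title = idx
--         if cm and first_company is None: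
--             first_company = idx
--     if first_title is not None:
--         return first_title
--     if first_company is not None:
--         return first_company
--     return -1
-- ===== Notes on version B (the rewrite author's own statement) =====
-- stated objective: simpler
-- what changed: Replaced A's three sequential full scans (both-match, then title-match, then company-match) by a single pass that normalizes each card once, returns immediately on a both-match and otherwise remembers the first title-only and first company-only indices.
import Mathlib
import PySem

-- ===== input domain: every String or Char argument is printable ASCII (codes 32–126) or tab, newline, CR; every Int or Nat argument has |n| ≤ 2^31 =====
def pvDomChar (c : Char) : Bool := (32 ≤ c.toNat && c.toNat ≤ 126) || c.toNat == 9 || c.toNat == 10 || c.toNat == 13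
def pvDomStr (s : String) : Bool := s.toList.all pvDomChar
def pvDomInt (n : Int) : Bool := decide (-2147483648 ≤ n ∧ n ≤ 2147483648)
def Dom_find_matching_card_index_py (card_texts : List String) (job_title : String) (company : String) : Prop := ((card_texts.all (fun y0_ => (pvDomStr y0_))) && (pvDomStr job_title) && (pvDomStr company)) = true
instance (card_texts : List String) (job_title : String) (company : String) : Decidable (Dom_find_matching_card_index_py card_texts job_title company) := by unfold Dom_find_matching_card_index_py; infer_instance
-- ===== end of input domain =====

-- B replaces A's three sequential scans by one pass that normalizes each card once,
-- returns at once on a both-match and otherwise remembers the first title/company match (objective: simpler).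

-- ===== PORT A =====
-- ' " ".join(s.strip().lower().split()) ' for the query strings
def pvNormQ (s : String) : String :=
  PySem.Str.join " " (PySem.Str.split₀ (PySem.Str.lower (PySem.Str.strip s)))

-- ' " ".join(text.lower().split()) ' for a card text
def pvNormC (s : String) : String :=
  PySem.Str.join " " (PySem.Str.split₀ (PySem.Str.lower s))

-- one of A's 'for idx, text in enumerate(card_texts): if p(text): return idx' loops
def pvScan (p : String → Bool) : List String → Int → Option Int
  | [], _ => none
  | t :: rest, idx => if p t then some idx else pvScan p rest (idx + 1)

def find_matching_card_index_py (card_texts : List String) (job_title : String) (company : String) : Int :=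
  let title_l := pvNormQ job_title
  let company_l := pvNormQ company
  match pvScan (fun t =>
      let normalized := pvNormC t
      (title_l != "") && PySem.Str.isIn title_l normalized &&
      (company_l != "") && PySem.Str.isIn company_l normalized) card_texts 0 with
  | some i => i
  | none =>
    match pvScan (fun t =>
        (title_l != "") && PySem.Str.isIn title_l (pvNormC t)) card_texts 0 with
    | some i => i
    | none =>
      match pvScan (fun t =>
          (company_l != "") && PySem.Str.isIn company_l (pvNormC t)) card_texts 0 with
      | some i => i
      | none => -1

-- ===== PORT B =====
-- B's single loop: early return on a both-match, else remember first title/company match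
def pvAltLoop (title_l company_l : String) :
    List String → Int → Option Int → Option Int → Int
  | [], _, ft, fc =>
    match ft with
    | some i => i
    | none => match fc with
      | some i => i
      | none => -1
  | t :: rest, idx, ft, fc =>
    let normalized := pvNormC t
    let tm := (title_l != "") && PySem.Str.isIn title_l normalized
    let cm := (company_l != "") && PySem.Str.isIn company_l normalized
    if tm && cm then idx
    else
      pvAltLoop title_l company_l rest (idx + 1)
        (match ft with | some i => some i | none => if tm then some idx else none)
        (match fc with | some i => some i | none => if cm then some idx else none)

def find_matching_card_index_py_alt (card_texts : List String) (job_title : String) (company : String) : Int :=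
  pvAltLoop (pvNormQ job_title) (pvNormQ company) card_texts 0 none none

-- ===== PRECONDITION & SPEC =====
def Spec_find_matching_card_index_py (card_texts : List String) (job_title : String) (company : String) (out : Int) : Prop := out = find_matching_card_index_py_alt card_texts job_title company
instance (card_texts : List String) (job_title : String) (company : String) (out : Int) : Decidable (Spec_find_matching_card_index_py card_texts job_title company out) := by unfold Spec_find_matching_card_index_py; infer_instance

-- ===== CLAIM (what is proved, stated in full; the proofs are below) =====
def Claim_equal_find_matching_card_index_py : Prop := ∀ (card_texts : List String) (job_title : String) (company : String), Dom_find_matching_card_index_py card_texts job_title company → Spec_find_matching_card_index_py card_texts job_title company (find_matching_card_index_py card_texts job_title company)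

-- ===== LEMMAS AND PROOFS =====

theorem pvScan_congr (p q : String → Bool) (h : ∀ t, p t = q t) :
    ∀ (l : List String) (idx : Int), pvScan p l idx = pvScan q l idx := by
  intro l
  induction l with
  | nil => intro idx; rfl
  | cons t rest ih => intro idx; simp only [pvScan, h, ih]

-- B's single loop equals A's three chained scans, for any carried first-match state
theorem pvAltLoop_eq (tl cl : String) :
    ∀ (l : List String) (idx : Int) (ft fc : Option Int),
    pvAltLoop tl cl l idx ft fc =
      (match pvScan (fun t =>
          ((tl != "") && PySem.Str.isIn tl (pvNormC t)) &&
          ((cl != "") && PySem.Str.isIn cl (pvNormC t))) l idx with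
       | some i => i
       | none =>
         match (match ft with
                | some i => some i
                | none => pvScan (fun t => (tl != "") && PySem.Str.isIn tl (pvNormC t)) l idx) with
         | some i => i
         | none =>
           match (match fc with
                  | some i => some i
                  | none => pvScan (fun t => (cl != "") && PySem.Str.isIn cl (pvNormC t)) l idx) with
           | some i => i
           | none => -1) := by
  intro l
  induction l with
  | nil =>
    intro idx ft fc
    cases ft <;> cases fc <;> simp [pvAltLoop, pvScan]
  | cons t rest ih =>
    intro idx ft fc
    cases h1 : (tl != "") && PySem.Str.isIn tl (pvNormC t) <;>
      cases h2 : (cl != "") && PySem.Str.isIn cl (pvNormC t) <;>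
        cases ft <;> cases fc <;>
          (simp only [pvAltLoop, pvScan, h1, h2]; simp [ih])

-- ===== VERDICT (by name: the statement is the Claim_ definition above) =====
theorem find_matching_card_index_py_spec : Claim_equal_find_matching_card_index_py := by
  unfold Claim_equal_find_matching_card_index_py
  intro card_texts job_title company _
  unfold Spec_find_matching_card_index_py
  unfold find_matching_card_index_py find_matching_card_index_py_alt
  rw [pvAltLoop_eq]
  rw [pvScan_congr
    (fun t =>
      ((pvNormQ job_title != "") && PySem.Str.isIn (pvNormQ job_title) (pvNormC t)) &&
      ((pvNormQ company != "") && PySem.Str.isIn (pvNormQ company) (pvNormC t)))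
    (fun t =>
      (pvNormQ job_title != "") && PySem.Str.isIn (pvNormQ job_title) (pvNormC t) &&
      (pvNormQ company != "") && PySem.Str.isIn (pvNormQ company) (pvNormC t))
    (by intro t; simp [Bool.and_assoc])]
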